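-- pv_equiv track=rewrite | github.com/balakamal/PythonPrograms | secretInteger.py | findTheSecretIntegers
-- ===== SOURCE A (Python) =====
-- from functools import reduce
--
-- def findTheSecretIntegers(N, B):
--     res = []
--     for i in B:
--         l = []
--
--         for j in B:
--             if i != j:
--                 l.append(j)
--         res.append(reduce(lambda x, y: x ^ y, l))
--     return res
-- ===== SOURCE B (Python) =====
-- def findTheSecretIntegers(N, B):
--     total = 0
--     cnt = {}
--     for x in B:
--         total ^= x
--         cnt[x] = cnt.get(x, 0) + 1
--     return [total ^ (x if cnt[x] % 2 else 0) for x in B]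
-- ===== Notes on version B (the rewrite author's own statement) =====
-- stated objective: faster
-- what changed: Replaced the nested rescan (for each element, filter and re-XOR the whole list) by one pass computing the total XOR and per-value counts, then each answer is total ^ (x if count[x] is odd else 0).
import Mathlib
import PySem

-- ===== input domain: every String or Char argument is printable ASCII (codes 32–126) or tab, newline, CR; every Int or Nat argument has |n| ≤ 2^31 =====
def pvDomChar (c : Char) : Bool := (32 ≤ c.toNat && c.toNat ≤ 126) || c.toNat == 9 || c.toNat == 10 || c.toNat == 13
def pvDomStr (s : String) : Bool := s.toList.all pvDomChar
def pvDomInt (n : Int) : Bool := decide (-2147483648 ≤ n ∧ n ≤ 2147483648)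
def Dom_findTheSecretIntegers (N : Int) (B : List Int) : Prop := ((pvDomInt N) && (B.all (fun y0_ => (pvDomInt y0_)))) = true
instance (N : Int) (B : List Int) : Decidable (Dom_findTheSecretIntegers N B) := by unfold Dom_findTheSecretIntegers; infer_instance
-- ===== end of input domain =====

-- B replaces A's quadratic per-element rescan by one pass (total XOR + value counts); equivalence proved on Pre_ (A raises elsewhere).

-- ===== PORT A =====
-- functools.reduce(xor, l): raises TypeError on l = []; those inputs are excluded by Pre_, so the 0 in the [] case is never reached.
def pvReduceXor (l : List Int) : Int :=
  match l with
  | [] => 0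
  | h :: t => t.foldl PySem.Int.bxor h

def findTheSecretIntegers (N : Int) (B : List Int) : List Int :=
  B.foldl (fun res i =>
    res ++ [pvReduceXor (B.foldl (fun l j => if i ≠ j then l ++ [j] else l) [])]) []

-- ===== PORT B =====
def findTheSecretIntegers_alt (N : Int) (B : List Int) : List Int :=
  let p := B.foldl (fun (p : Int × PySem.Dict Int Int) x =>
    (PySem.Int.bxor p.1 x, p.2.insert x (p.2.getD x 0 + 1))) (0, PySem.Dict.empty)
  B.map (fun x => PySem.Int.bxor p.1 (if PySem.Int.mod (p.2.getD x 0) 2 ≠ 0 then x else 0))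

-- ===== PRECONDITION & SPEC =====
-- Pre_ excludes exactly the inputs where A raises TypeError: a nonempty B whose elements are all equal
-- (there the "others" list of some element is empty and reduce has nothing to fold).
def Pre_findTheSecretIntegers (N : Int) (B : List Int) : Prop :=
  ∀ x ∈ B, ∃ y ∈ B, y ≠ x
instance (N : Int) (B : List Int) : Decidable (Pre_findTheSecretIntegers N B) := by
  unfold Pre_findTheSecretIntegers; infer_instance

def pvWitness_findTheSecretIntegers : Int × List Int := (3, [1, 2, 1])

def Spec_findTheSecretIntegers (N : Int) (B : List Int) (out : List Int) : Prop := out = findTheSecretIntegers_alt N B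
instance (N : Int) (B : List Int) (out : List Int) : Decidable (Spec_findTheSecretIntegers N B out) := by unfold Spec_findTheSecretIntegers; infer_instance

-- ===== CLAIM (what is proved, stated in full; the proofs are below) =====
def Claim_equal_findTheSecretIntegers : Prop := ∀ (N : Int) (B : List Int), Dom_findTheSecretIntegers N B → Pre_findTheSecretIntegers N B → Spec_findTheSecretIntegers N B (findTheSecretIntegers N B)

-- ===== LEMMAS AND PROOFS =====

-- XOR of a whole list, the quantity both programs are really computing
def pvXorAll (l : List Int) : Int := l.foldl PySem.Int.bxor 0

lemma bx_nn (m n : Nat) : PySem.Int.bxor (Int.negSucc m) (Int.negSucc n) = ((m ^^^ n : Nat) : Int) := by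
  simp only [PySem.Int.bxor, Int.negSucc_eq]
  rw [if_neg (by omega), if_neg (by omega)]
  norm_num

lemma bx_pn (m n : Nat) : PySem.Int.bxor ((m : Nat) : Int) (Int.negSucc n) = Int.negSucc (m ^^^ n) := by
  simp only [PySem.Int.bxor, Int.negSucc_eq]
  rw [if_pos (by omega), if_neg (by omega)]
  norm_num; ring

lemma bx_np (m n : Nat) : PySem.Int.bxor (Int.negSucc m) ((n : Nat) : Int) = Int.negSucc (m ^^^ n) := by
  rw [PySem.Int.bxor_comm, bx_pn, Nat.xor_comm]

lemma pvBxor_assoc (a b c : Int) :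
    PySem.Int.bxor (PySem.Int.bxor a b) c = PySem.Int.bxor a (PySem.Int.bxor b c) := by
  cases a <;> cases b <;> cases c <;>
    simp [Int.ofNat_eq_natCast, bx_pn, bx_np, bx_nn, Nat.xor_assoc]

lemma pvBxor_zero_left (a : Int) : PySem.Int.bxor 0 a = a := by
  rw [PySem.Int.bxor_comm, PySem.Int.bxor_zero]

lemma pvBxor_cancel (a b : Int) : PySem.Int.bxor a (PySem.Int.bxor a b) = b := by
  rw [← pvBxor_assoc, PySem.Int.bxor_self, pvBxor_zero_left]

lemma pvFoldl_bxor (l : List Int) (a : Int) :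
    l.foldl PySem.Int.bxor a = PySem.Int.bxor a (pvXorAll l) := by
  induction l generalizing a with
  | nil => simp [pvXorAll, PySem.Int.bxor_zero]
  | cons h t ih =>
    simp only [pvXorAll, List.foldl_cons] at *
    rw [ih, ih (PySem.Int.bxor 0 h), pvBxor_zero_left, pvBxor_assoc]

lemma pvXorAll_cons (x : Int) (l : List Int) :
    pvXorAll (x :: l) = PySem.Int.bxor x (pvXorAll l) := by
  simp only [pvXorAll, List.foldl_cons, pvBxor_zero_left]
  exact pvFoldl_bxor l x

lemma pvReduceXor_ne_nil (l : List Int) (h : l ≠ []) : pvReduceXor l = pvXorAll l := by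
  cases l with
  | nil => exact absurd rfl h
  | cons x t => simp only [pvReduceXor, pvXorAll_cons]; exact pvFoldl_bxor t x

lemma pvXorAll_filter_beq (B : List Int) (i : Int) :
    pvXorAll (B.filter (fun j => j == i)) = if B.count i % 2 = 1 then i else 0 := by
  induction B with
  | nil => simp [pvXorAll]
  | cons b t ih =>
    by_cases hb : b = i
    · subst hb
      rw [List.count_cons_self]
      rw [List.filter_cons_of_pos (by simp), pvXorAll_cons, ih]
      rcases Nat.even_or_odd (t.count b) with he | ho
      · have h0 := Nat.even_iff.mp he
        rw [if_neg (by omega), if_pos (by omega), PySem.Int.bxor_zero]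
      · have h1 := Nat.odd_iff.mp ho
        rw [if_pos (by omega), if_neg (by omega), PySem.Int.bxor_self]
    · rw [List.count_cons_of_ne hb, List.filter_cons_of_neg (by simp [hb]), ih]

lemma pvXorAll_split (p : Int → Bool) (B : List Int) :
    PySem.Int.bxor (pvXorAll (B.filter p)) (pvXorAll (B.filter (fun x => !p x))) = pvXorAll B := by
  induction B with
  | nil => simp [pvXorAll]
  | cons b t ih =>
    cases hp : p b
    · rw [List.filter_cons_of_neg (by simp [hp]), List.filter_cons_of_pos (by simp [hp]),
        pvXorAll_cons, pvXorAll_cons, PySem.Int.bxor_comm _ (PySem.Int.bxor b _), pvBxor_assoc]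
      rw [PySem.Int.bxor_comm (pvXorAll (List.filter (fun x => !p x) t)) (pvXorAll (List.filter p t)), ih]
    · rw [List.filter_cons_of_pos (by simp [hp]), List.filter_cons_of_neg (by simp [hp]),
        pvXorAll_cons, pvXorAll_cons, pvBxor_assoc, ih]

lemma pvMain (N : Int) (B : List Int) (hpre : ∀ x ∈ B, ∃ y ∈ B, y ≠ x) :
    findTheSecretIntegers N B = findTheSecretIntegers_alt N B := by
  have halt : findTheSecretIntegers_alt N B =
      B.map (fun x => PySem.Int.bxor
        (B.foldl (fun (p : Int × PySem.Dict Int Int) x => (PySem.Int.bxor p.1 x, p.2.insert x (p.2.getD x 0 + 1))) (0, PySem.Dict.empty)).1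
        (if PySem.Int.mod ((B.foldl (fun (p : Int × PySem.Dict Int Int) x => (PySem.Int.bxor p.1 x, p.2.insert x (p.2.getD x 0 + 1))) (0, PySem.Dict.empty)).2.getD x 0) 2 ≠ 0 then x else 0)) := rfl
  unfold findTheSecretIntegers
  rw [halt, PySem.List.foldl_append_singleton_eq_map, List.nil_append]
  simp only [PySem.List.foldl_prod_mk (f := fun s e => PySem.Int.bxor s e)
      (g := fun (d : PySem.Dict Int Int) x => d.insert x (d.getD x 0 + 1)),
    PySem.Dict.foldl_insert_getD_add_one_eq_counter]
  refine List.map_congr_left (fun x hx => ?_)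
  rw [PySem.List.foldl_append_ite_eq_filter, List.nil_append]
  -- A side: reduce over the nonempty complement list
  obtain ⟨y, hyB, hyx⟩ := hpre x hx
  have hfil : (B.filter (fun j => decide (¬ x = j))) ≠ [] := by
    intro hnil
    have hmem : y ∈ B.filter (fun j => decide (¬ x = j)) :=
      List.mem_filter.mpr ⟨hyB, by simp [Ne.symm hyx]⟩
    rw [hnil] at hmem
    simp at hmem
  rw [pvReduceXor_ne_nil _ hfil]
  have hcongr : B.filter (fun j => decide (¬ x = j)) = B.filter (fun j => !(j == x)) := by
    refine List.filter_congr (fun j _ => ?_)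
    simp [beq_eq_decide, eq_comm]
  rw [hcongr]
  have hsplit := pvXorAll_split (fun j => j == x) B
  have : pvXorAll (B.filter (fun j => !(j == x))) =
      PySem.Int.bxor (pvXorAll (B.filter (fun j => j == x))) (pvXorAll B) := by
    rw [← hsplit, pvBxor_cancel]
  rw [this, pvXorAll_filter_beq]
  -- B side
  show _ = PySem.Int.bxor (B.foldl PySem.Int.bxor 0)
      (if PySem.Int.mod ((PySem.Dict.counter B).getD x 0) 2 ≠ 0 then x else 0)
  rw [PySem.Dict.getD_counter]
  have hmod : PySem.Int.mod ((B.count x : Nat) : Int) 2 = ((B.count x % 2 : Nat) : Int) := by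
    exact_mod_cast PySem.Int.mod_natCast (B.count x) 2
  rw [hmod]
  have : pvXorAll B = B.foldl PySem.Int.bxor 0 := rfl
  rw [this, PySem.Int.bxor_comm]
  congr 1
  by_cases hc : B.count x % 2 = 1
  · rw [if_pos hc, if_pos (by omega)]
  · rw [if_neg hc, if_neg (by omega)]

-- ===== VERDICT (by name: the statement is the Claim_ definition above) =====
theorem findTheSecretIntegers_spec : Claim_equal_findTheSecretIntegers := by
  intro N B _ hpre
  unfold Spec_findTheSecretIntegers
  exact pvMain N B hpre
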